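-- pv_equiv track=rewrite | github.com/erev0s/Mobilytix | mcp_server/tools/static/native.py | _interesting_strings
-- ===== SOURCE A (Python) =====
-- MAX_CATEGORY_ITEMS = 20
--
-- def _dedupe(values: list[str], limit: int) -> list[str]:
--     seen: set[str] = set()
--     result: list[str] = []
--     for value in values:
--         if not value or value in seen:
--             continue
--         seen.add(value)
--         result.append(value)
--         if len(result) >= limit:
--             break
--     return result
--
-- def _interesting_strings(all_strings: list[str], limit: int = MAX_CATEGORY_ITEMS) -> dict[str, list[str]]:
--     interesting = {
--         "urls": [],
--         "paths": [],
--         "crypto": [],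
--         "debug": [],
--         "other": [],
--     }
--
--     for s in all_strings:
--         s = s.strip()
--         if len(s) < 4:
--             continue
--         s_lower = s.lower()
--         if s.startswith("http://") or s.startswith("https://"):
--             interesting["urls"].append(s)
--         elif s.startswith("/") and not s.startswith("/usr") and not s.startswith("/lib"):
--             interesting["paths"].append(s)
--         elif any(kw in s_lower for kw in ["aes", "rsa", "sha", "md5", "encrypt", "decrypt", "key"]):
--             interesting["crypto"].append(s)
--         elif any(kw in s_lower for kw in ["debug", "log", "error", "warning", "password", "token"]):
--             interesting["debug"].append(s)
--         else:
--             interesting["other"].append(s)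
--
--     return {key: _dedupe(values, limit) for key, values in interesting.items()}
-- ===== SOURCE B (Python) =====
-- MAX_CATEGORY_ITEMS = 20
--
-- _KEYS = ("urls", "paths", "crypto", "debug", "other")
--
-- def _classify(s: str) -> str:
--     s_lower = s.lower()
--     if s.startswith("http://") or s.startswith("https://"):
--         return "urls"
--     if s.startswith("/") and not s.startswith("/usr") and not s.startswith("/lib"):
--         return "paths"
--     if any(kw in s_lower for kw in ("aes", "rsa", "sha", "md5", "encrypt", "decrypt", "key")):
--         return "crypto"
--     if any(kw in s_lower for kw in ("debug", "log", "error", "warning", "password", "token")):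
--         return "debug"
--     return "other"
--
-- def _take_distinct(values: list[str], limit: int) -> list[str]:
--     out: list[str] = []
--     seen: set[str] = set()
--     for v in values:
--         if v in seen:
--             continue
--         seen.add(v)
--         out.append(v)
--         if len(out) >= limit:
--             break
--     return out
--
-- def _interesting_strings(all_strings: list[str], limit: int = MAX_CATEGORY_ITEMS) -> dict[str, list[str]]:
--     kept = [t for t in (s.strip() for s in all_strings) if len(t) >= 4]
--     return {key: _take_distinct([t for t in kept if _classify(t) == key], limit)
--             for key in _KEYS}
-- ===== Notes on version B (the rewrite author's own statement) =====
-- stated objective: alternative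
-- what changed: Replaces the single classify-and-append-into-a-dict loop followed by a dedupe of each bucket with a strip/length filter done once and then, per bucket key, one filtered scan (via a _classify key function) fed to a capped distinct-take; the intermediate five-bucket dict disappears.
import Mathlib
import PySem

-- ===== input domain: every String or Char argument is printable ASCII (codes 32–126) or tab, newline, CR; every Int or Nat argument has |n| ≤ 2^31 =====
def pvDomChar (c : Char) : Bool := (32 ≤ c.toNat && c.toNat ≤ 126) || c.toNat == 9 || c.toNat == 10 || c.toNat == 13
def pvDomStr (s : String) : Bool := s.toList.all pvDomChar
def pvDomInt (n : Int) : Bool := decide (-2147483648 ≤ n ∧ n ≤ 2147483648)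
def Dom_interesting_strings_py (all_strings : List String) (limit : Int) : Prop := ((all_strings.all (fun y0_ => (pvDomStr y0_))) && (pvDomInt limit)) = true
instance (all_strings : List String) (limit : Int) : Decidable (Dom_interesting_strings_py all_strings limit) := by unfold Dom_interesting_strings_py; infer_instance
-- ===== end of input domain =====

-- B replaces A's classify-into-a-dict loop + per-bucket _dedupe by a shared strip/length
-- filter and, per bucket key, one filtered scan fed to a capped distinct-take (objective: alternative).

-- ===== PORT A =====
-- port of A's _dedupe: seen/result are the loop accumulators, 'break' returns result
def pvDedupeA : List String → PySem.Set String → List String → Int → List String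
  | [], _, result, _ => result
  | v :: rest, seen, result, limit =>
    if v == "" || PySem.Set.contains seen v then
      pvDedupeA rest seen result limit
    else
      let seen' := PySem.Set.add seen v
      let result' := result ++ [v]
      if limit ≤ (result'.length : Int) then result'
      else pvDedupeA rest seen' result' limit

def interesting_strings_py (all_strings : List String) (limit : Int) : List (String × List String) :=
  let interesting : PySem.Dict String (List String) :=
    PySem.Dict.mk [("urls", []), ("paths", []), ("crypto", []), ("debug", []), ("other", [])]
  let interesting := all_strings.foldl (fun d s0 =>
    let s := PySem.Str.strip s0
    if PySem.Str.len s < 4 then d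
    else
      let s_lower := PySem.Str.lower s
      if PySem.Str.startswith s "http://" || PySem.Str.startswith s "https://" then
        d.modify "urls" [] (· ++ [s])
      else if PySem.Str.startswith s "/" && !PySem.Str.startswith s "/usr" && !PySem.Str.startswith s "/lib" then
        d.modify "paths" [] (· ++ [s])
      else if ["aes", "rsa", "sha", "md5", "encrypt", "decrypt", "key"].any (fun kw => PySem.Str.isIn kw s_lower) then
        d.modify "crypto" [] (· ++ [s])
      else if ["debug", "log", "error", "warning", "password", "token"].any (fun kw => PySem.Str.isIn kw s_lower) then
        d.modify "debug" [] (· ++ [s])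
      else
        d.modify "other" [] (· ++ [s])) interesting
  interesting.items.map (fun kv => (kv.1, pvDedupeA kv.2 PySem.Set.empty [] limit))

-- ===== PORT B =====
def pvClassify (s : String) : String :=
  let s_lower := PySem.Str.lower s
  if PySem.Str.startswith s "http://" || PySem.Str.startswith s "https://" then "urls"
  else if PySem.Str.startswith s "/" && !PySem.Str.startswith s "/usr" && !PySem.Str.startswith s "/lib" then "paths"
  else if ["aes", "rsa", "sha", "md5", "encrypt", "decrypt", "key"].any (fun kw => PySem.Str.isIn kw s_lower) then "crypto"
  else if ["debug", "log", "error", "warning", "password", "token"].any (fun kw => PySem.Str.isIn kw s_lower) then "debug"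
  else "other"

-- port of B's _take_distinct
def pvTakeDistinct : List String → PySem.Set String → List String → Int → List String
  | [], _, out, _ => out
  | v :: rest, seen, out, limit =>
    if PySem.Set.contains seen v then
      pvTakeDistinct rest seen out limit
    else
      let seen' := PySem.Set.add seen v
      let out' := out ++ [v]
      if limit ≤ (out'.length : Int) then out'
      else pvTakeDistinct rest seen' out' limit

def interesting_strings_py_alt (all_strings : List String) (limit : Int) : List (String × List String) :=
  let kept := (all_strings.map PySem.Str.strip).filter (fun t => 4 ≤ PySem.Str.len t)
  ["urls", "paths", "crypto", "debug", "other"].map (fun key =>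
    (key, pvTakeDistinct (kept.filter (fun t => pvClassify t == key)) PySem.Set.empty [] limit))

-- ===== PRECONDITION & SPEC =====
def Spec_interesting_strings_py (all_strings : List String) (limit : Int) (out : List (String × List String)) : Prop := out = interesting_strings_py_alt all_strings limit
instance (all_strings : List String) (limit : Int) (out : List (String × List String)) : Decidable (Spec_interesting_strings_py all_strings limit out) := by unfold Spec_interesting_strings_py; infer_instance

-- ===== CLAIM (what is proved, stated in full; the proofs are below) =====
def Claim_equal_interesting_strings_py : Prop := ∀ (all_strings : List String) (limit : Int), Dom_interesting_strings_py all_strings limit → Spec_interesting_strings_py all_strings limit (interesting_strings_py all_strings limit)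

-- ===== LEMMAS AND PROOFS =====

-- the per-bucket list A's classification loop collects, phrased as B's filters
def pvColl (l : List String) (k : String) : List String :=
  ((l.map PySem.Str.strip).filter (fun t => 4 ≤ PySem.Str.len t)).filter (fun t => pvClassify t == k)

-- A's _dedupe and B's _take_distinct agree when no collected string is empty
theorem pvDedupe_eq_take (l : List String) (h : ∀ v ∈ l, v ≠ "") :
    ∀ seen out limit, pvDedupeA l seen out limit = pvTakeDistinct l seen out limit := by
  induction l with
  | nil => intro seen out limit; rfl
  | cons v rest ih =>
    intro seen out limit
    have hv : (v == "") = false := by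
      simpa using h v (List.mem_cons_self ..)
    simp only [pvDedupeA, pvTakeDistinct, hv, Bool.false_or]
    have ih' := ih (fun x hx => h x (List.mem_cons_of_mem _ hx))
    by_cases hc : PySem.Set.contains seen v = true
    · simp only [hc, if_true, ih']
    · simp only [Bool.not_eq_true] at hc
      simp only [hc, Bool.false_eq_true, if_false, ih']

theorem pvColl_cons_dropped (s : String) (tl : List String) (k : String)
    (h4 : PySem.Str.len (PySem.Str.strip s) < 4) :
    pvColl (s :: tl) k = pvColl tl k := by
  simp only [pvColl, List.map_cons, List.filter_cons, decide_eq_true_eq,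
    if_neg (by omega : ¬ (4 ≤ PySem.Str.len (PySem.Str.strip s)))]

theorem pvColl_cons_kept (s : String) (tl : List String) (k : String)
    (h4 : ¬ PySem.Str.len (PySem.Str.strip s) < 4) :
    pvColl (s :: tl) k =
      (if pvClassify (PySem.Str.strip s) == k then [PySem.Str.strip s] else []) ++ pvColl tl k := by
  simp only [pvColl, List.map_cons, List.filter_cons, decide_eq_true_eq,
    if_pos (by omega : (4 ≤ PySem.Str.len (PySem.Str.strip s)))]
  by_cases hk : (pvClassify (PySem.Str.strip s) == k) = true
  · simp only [hk, if_true, List.singleton_append]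
  · simp only [Bool.not_eq_true] at hk
    simp only [hk, Bool.false_eq_true, if_false, List.nil_append]

theorem pvModify_urls (a b c d e : List String) (f : List String → List String) :
    (PySem.Dict.mk [("urls",a),("paths",b),("crypto",c),("debug",d),("other",e)]).modify "urls" [] f
    = PySem.Dict.mk [("urls",f a),("paths",b),("crypto",c),("debug",d),("other",e)] := by
  simp [PySem.Dict.modify, PySem.Dict.insert, PySem.Dict.getD, PySem.Dict.get?]

theorem pvModify_paths (a b c d e : List String) (f : List String → List String) :
    (PySem.Dict.mk [("urls",a),("paths",b),("crypto",c),("debug",d),("other",e)]).modify "paths" [] f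
    = PySem.Dict.mk [("urls",a),("paths",f b),("crypto",c),("debug",d),("other",e)] := by
  simp [PySem.Dict.modify, PySem.Dict.insert, PySem.Dict.getD, PySem.Dict.get?]

theorem pvModify_crypto (a b c d e : List String) (f : List String → List String) :
    (PySem.Dict.mk [("urls",a),("paths",b),("crypto",c),("debug",d),("other",e)]).modify "crypto" [] f
    = PySem.Dict.mk [("urls",a),("paths",b),("crypto",f c),("debug",d),("other",e)] := by
  simp [PySem.Dict.modify, PySem.Dict.insert, PySem.Dict.getD, PySem.Dict.get?]

theorem pvModify_debug (a b c d e : List String) (f : List String → List String) :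
    (PySem.Dict.mk [("urls",a),("paths",b),("crypto",c),("debug",d),("other",e)]).modify "debug" [] f
    = PySem.Dict.mk [("urls",a),("paths",b),("crypto",c),("debug",f d),("other",e)] := by
  simp [PySem.Dict.modify, PySem.Dict.insert, PySem.Dict.getD, PySem.Dict.get?]

theorem pvModify_other (a b c d e : List String) (f : List String → List String) :
    (PySem.Dict.mk [("urls",a),("paths",b),("crypto",c),("debug",d),("other",e)]).modify "other" [] f
    = PySem.Dict.mk [("urls",a),("paths",b),("crypto",c),("debug",d),("other",f e)] := by
  simp [PySem.Dict.modify, PySem.Dict.insert, PySem.Dict.getD, PySem.Dict.get?]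

-- A's classification loop, started from arbitrary bucket contents, appends exactly pvColl per bucket
theorem pvFold (l : List String) : ∀ a b c d e : List String,
    l.foldl (fun d s0 =>
      let s := PySem.Str.strip s0
      if PySem.Str.len s < 4 then d
      else
        let s_lower := PySem.Str.lower s
        if PySem.Str.startswith s "http://" || PySem.Str.startswith s "https://" then
          d.modify "urls" [] (· ++ [s])
        else if PySem.Str.startswith s "/" && !PySem.Str.startswith s "/usr" && !PySem.Str.startswith s "/lib" then
          d.modify "paths" [] (· ++ [s])
        else if ["aes", "rsa", "sha", "md5", "encrypt", "decrypt", "key"].any (fun kw => PySem.Str.isIn kw s_lower) then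
          d.modify "crypto" [] (· ++ [s])
        else if ["debug", "log", "error", "warning", "password", "token"].any (fun kw => PySem.Str.isIn kw s_lower) then
          d.modify "debug" [] (· ++ [s])
        else
          d.modify "other" [] (· ++ [s]))
      (PySem.Dict.mk [("urls",a),("paths",b),("crypto",c),("debug",d),("other",e)])
    = PySem.Dict.mk [("urls", a ++ pvColl l "urls"), ("paths", b ++ pvColl l "paths"),
        ("crypto", c ++ pvColl l "crypto"), ("debug", d ++ pvColl l "debug"),
        ("other", e ++ pvColl l "other")] := by
  induction l with
  | nil => intro a b c d e; simp [pvColl]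
  | cons s tl ih =>
    intro a b c d e
    rw [List.foldl_cons]
    by_cases h4 : PySem.Str.len (PySem.Str.strip s) < 4
    · simp only [if_pos h4]
      rw [ih]
      simp only [pvColl_cons_dropped _ _ _ h4]
    · have hkept := fun k => pvColl_cons_kept s tl k h4
      by_cases h1 : (PySem.Str.startswith (PySem.Str.strip s) "http://" || PySem.Str.startswith (PySem.Str.strip s) "https://") = true
      · have hcl : pvClassify (PySem.Str.strip s) = "urls" := by
          simp only [pvClassify, h1, if_true]
        simp only [if_neg h4, h1, if_true, pvModify_urls]
        rw [ih]
        simp [hkept, hcl, List.append_assoc]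
      · have h1' : _ = false := Bool.not_eq_true _ |>.mp h1
        by_cases h2 : (PySem.Str.startswith (PySem.Str.strip s) "/" && !PySem.Str.startswith (PySem.Str.strip s) "/usr" && !PySem.Str.startswith (PySem.Str.strip s) "/lib") = true
        · have hcl : pvClassify (PySem.Str.strip s) = "paths" := by
            simp only [pvClassify, h1', h2, Bool.false_eq_true, if_false, if_true]
          simp only [if_neg h4, h1', h2, Bool.false_eq_true, if_false, if_true, pvModify_paths]
          rw [ih]
          simp [hkept, hcl, List.append_assoc]
        · have h2' : _ = false := Bool.not_eq_true _ |>.mp h2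
          by_cases h3 : (["aes", "rsa", "sha", "md5", "encrypt", "decrypt", "key"].any (fun kw => PySem.Str.isIn kw (PySem.Str.lower (PySem.Str.strip s)))) = true
          · have hcl : pvClassify (PySem.Str.strip s) = "crypto" := by
              simp only [pvClassify, h1', h2', h3, Bool.false_eq_true, if_false, if_true]
            simp only [if_neg h4, h1', h2', h3, Bool.false_eq_true, if_false, if_true, pvModify_crypto]
            rw [ih]
            simp [hkept, hcl, List.append_assoc]
          · have h3' : _ = false := Bool.not_eq_true _ |>.mp h3
            by_cases h5 : (["debug", "log", "error", "warning", "password", "token"].any (fun kw => PySem.Str.isIn kw (PySem.Str.lower (PySem.Str.strip s)))) = true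
            · have hcl : pvClassify (PySem.Str.strip s) = "debug" := by
                simp only [pvClassify, h1', h2', h3', h5, Bool.false_eq_true, if_false, if_true]
              simp only [if_neg h4, h1', h2', h3', h5, Bool.false_eq_true, if_false, if_true, pvModify_debug]
              rw [ih]
              simp [hkept, hcl, List.append_assoc]
            · have h5' : _ = false := Bool.not_eq_true _ |>.mp h5
              have hcl : pvClassify (PySem.Str.strip s) = "other" := by
                simp only [pvClassify, h1', h2', h3', h5', Bool.false_eq_true, if_false]
              simp only [if_neg h4, h1', h2', h3', h5', Bool.false_eq_true, if_false, pvModify_other]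
              rw [ih]
              simp [hkept, hcl, List.append_assoc]

theorem pvColl_ne_empty (l : List String) (k : String) : ∀ v ∈ pvColl l k, v ≠ "" := by
  intro v hv hveq
  have h1 := List.of_mem_filter (List.mem_of_mem_filter hv)
  rw [hveq] at h1
  exact absurd (of_decide_eq_true h1) (by decide)

-- ===== VERDICT (by name: the statement is the Claim_ definition above) =====
theorem interesting_strings_py_spec : Claim_equal_interesting_strings_py := by
  intro all_strings limit _
  unfold Spec_interesting_strings_py interesting_strings_py interesting_strings_py_alt
  simp only [pvFold, List.map_cons, List.map_nil, List.nil_append,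
    pvDedupe_eq_take _ (pvColl_ne_empty _ _)]
  simp only [pvColl]
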